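-- pv_equiv track=rewrite | github.com/FotopoulosGeorge/ds-ml-dashboard | src/ml/pretrained/pattern_mining.py | _find_sequential_patterns
-- ===== SOURCE A (Python) =====
-- def _find_sequential_patterns(sequences, min_length, max_length, min_frequency):
--     """Find frequent sequential patterns"""
--     # Simple implementation - can be enhanced with more sophisticated algorithms
--     pattern_counts = {}
--
--     for sequence in sequences:
--         # Generate all subsequences
--         for length in range(min_length, min(max_length + 1, len(sequence) + 1)):
--             for i in range(len(sequence) - length + 1):
--                 subseq = tuple(sequence[i:i+length])
--                 pattern_counts[subseq] = pattern_counts.get(subseq, 0) + 1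
--
--     # Filter by minimum frequency
--     frequent_patterns = {
--         pattern: count for pattern, count in pattern_counts.items()
--         if count >= min_frequency
--     }
--
--     return frequent_patterns
-- ===== SOURCE B (Python) =====
-- def _find_sequential_patterns(sequences, min_length, max_length, min_frequency):
--     """Sort-then-scan counting: flatten windows, sort them, count equal runs,
--     then one first-seen pass over the windows emits the frequent patterns."""
--     windows = [tuple(seq[i:i + length])
--                for seq in sequences
--                for length in range(min_length, min(max_length + 1, len(seq) + 1))
--                for i in range(len(seq) - length + 1)]
--     # run-length count over the sorted windows: equal windows are adjacent
--     ws = sorted(windows)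
--     counts = {}
--     n = len(ws)
--     i = 0
--     while i < n:
--         x = ws[i]
--         j = i + 1
--         while j < n and ws[j] == x:
--             j += 1
--         counts[x] = j - i
--         i = j
--     # emit in first-seen order, keeping only frequent patterns
--     result = {}
--     seen = set()
--     for w in windows:
--         if w not in seen:
--             seen.add(w)
--             c = counts[w]
--             if c >= min_frequency:
--                 result[w] = c
--     return result
-- ===== Notes on version B (the rewrite author's own statement) =====
-- stated objective: alternative
-- what changed: A counts every window incrementally in a hash dict during the scan; B sorts the flattened window list, obtains each pattern's exact count by run-length scanning the sorted list (equal windows are adjacent), and then emits frequent patterns in one first-seen pass over the original window order.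
import Mathlib
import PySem

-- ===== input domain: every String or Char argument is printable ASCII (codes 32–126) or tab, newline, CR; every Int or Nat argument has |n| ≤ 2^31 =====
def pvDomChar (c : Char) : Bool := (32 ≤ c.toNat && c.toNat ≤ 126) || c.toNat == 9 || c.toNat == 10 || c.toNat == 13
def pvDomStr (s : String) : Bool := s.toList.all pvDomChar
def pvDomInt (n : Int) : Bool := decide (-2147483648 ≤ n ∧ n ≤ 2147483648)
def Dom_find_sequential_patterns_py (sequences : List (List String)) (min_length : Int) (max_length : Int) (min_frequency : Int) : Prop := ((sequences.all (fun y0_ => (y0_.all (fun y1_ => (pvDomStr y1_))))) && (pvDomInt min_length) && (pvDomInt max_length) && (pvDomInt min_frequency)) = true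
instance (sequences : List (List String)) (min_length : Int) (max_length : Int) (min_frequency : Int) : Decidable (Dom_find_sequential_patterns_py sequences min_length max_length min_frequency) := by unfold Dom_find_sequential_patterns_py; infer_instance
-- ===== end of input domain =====

-- B replaces A's incremental hash-dict counting by sort + run-length counting of the window list,
-- followed by a first-seen emission pass (alternative algorithm, not claimed faster).

-- ===== PORT A =====
def find_sequential_patterns_py (sequences : List (List String)) (min_length : Int) (max_length : Int) (min_frequency : Int) : List (List String × Int) :=
  let pattern_counts : PySem.Dict (List String) Int :=
    sequences.foldl (fun pc sequence =>
      (PySem.List.pyRange min_length (min (max_length + 1) ((sequence.length : Int) + 1)) 1).foldl (fun pc length =>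
        (PySem.List.pyRange 0 ((sequence.length : Int) - length + 1) 1).foldl (fun pc i =>
          let subseq := PySem.List.slice sequence (some i) (some (i + length))
          pc.insert subseq (pc.getD subseq 0 + 1)) pc) pc) PySem.Dict.empty
  let frequent_patterns : PySem.Dict (List String) Int :=
    pattern_counts.items.foldl (fun fp pc =>
      if min_frequency ≤ pc.2 then fp.insert pc.1 pc.2 else fp) PySem.Dict.empty
  frequent_patterns.items

-- ===== PORT B =====
-- the inner 'while j < n and ws[j] == x: j += 1' scan: j - i = 1 + (copies of x after position i)
def pvRunLen (x : List String) : List (List String) → Nat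
  | [] => 0
  | y :: ys => if y == x then 1 + pvRunLen x ys else 0

-- the outer 'while i < n:' loop, modeled by recursion on the remaining suffix ws[i:]:
-- record the run of ws[i] (counts[x] = j - i), continue at i = j
def pvRleGo (rest : List (List String)) (counts : PySem.Dict (List String) Int) : PySem.Dict (List String) Int :=
  match rest with
  | [] => counts
  | x :: xs =>
    let run : Nat := 1 + pvRunLen x xs
    pvRleGo ((x :: xs).drop run) (counts.insert x (run : Int))
termination_by rest.length
decreasing_by simp

def find_sequential_patterns_py_alt (sequences : List (List String)) (min_length : Int) (max_length : Int) (min_frequency : Int) : List (List String × Int) :=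
  let windows : List (List String) :=
    sequences.flatMap (fun seq =>
      (PySem.List.pyRange min_length (min (max_length + 1) ((seq.length : Int) + 1)) 1).flatMap (fun length =>
        (PySem.List.pyRange 0 ((seq.length : Int) - length + 1) 1).map (fun i =>
          PySem.List.slice seq (some i) (some (i + length)))))
  let counts : PySem.Dict (List String) Int :=
    pvRleGo (PySem.List.sorted windows (fun x => x) false) PySem.Dict.empty
  let result : PySem.Dict (List String) Int :=
    (windows.foldl (fun (st : PySem.Set (List String) × PySem.Dict (List String) Int) w =>
      if PySem.Set.contains st.1 w then st
      else
        -- c = counts[w]; the key is always present since w occurs in windows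
        let c : Int := (counts.get? w).getD 0
        if min_frequency ≤ c then (PySem.Set.add st.1 w, st.2.insert w c)
        else (PySem.Set.add st.1 w, st.2)) (PySem.Set.empty, PySem.Dict.empty)).2
  result.items

-- ===== PRECONDITION & SPEC =====
def Spec_find_sequential_patterns_py (sequences : List (List String)) (min_length : Int) (max_length : Int) (min_frequency : Int) (out : List (List String × Int)) : Prop := out = find_sequential_patterns_py_alt sequences min_length max_length min_frequency
instance (sequences : List (List String)) (min_length : Int) (max_length : Int) (min_frequency : Int) (out : List (List String × Int)) : Decidable (Spec_find_sequential_patterns_py sequences min_length max_length min_frequency out) := by unfold Spec_find_sequential_patterns_py; infer_instance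

-- ===== CLAIM (what is proved, stated in full; the proofs are below) =====
def Claim_equal_find_sequential_patterns_py : Prop := ∀ (sequences : List (List String)) (min_length : Int) (max_length : Int) (min_frequency : Int), Dom_find_sequential_patterns_py sequences min_length max_length min_frequency → Spec_find_sequential_patterns_py sequences min_length max_length min_frequency (find_sequential_patterns_py sequences min_length max_length min_frequency)

-- ===== LEMMAS AND PROOFS =====

-- A's nested counting loops build exactly Counter(windows)
theorem counts_eq (sequences : List (List String)) (min_length max_length : Int) :
    sequences.foldl (fun pc sequence =>
      (PySem.List.pyRange min_length (min (max_length + 1) ((sequence.length : Int) + 1)) 1).foldl (fun pc length =>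
        (PySem.List.pyRange 0 ((sequence.length : Int) - length + 1) 1).foldl (fun pc i =>
          let subseq := PySem.List.slice sequence (some i) (some (i + length))
          pc.insert subseq (pc.getD subseq 0 + 1)) pc) pc) PySem.Dict.empty
    = PySem.Dict.counter (sequences.flatMap (fun seq =>
      (PySem.List.pyRange min_length (min (max_length + 1) ((seq.length : Int) + 1)) 1).flatMap (fun length =>
        (PySem.List.pyRange 0 ((seq.length : Int) - length + 1) 1).map (fun i =>
          PySem.List.slice seq (some i) (some (i + length)))))) := by
  rw [← PySem.Dict.foldl_insert_getD_add_one_eq_counter, List.foldl_flatMap]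
  apply PySem.List.foldl_congr_mem
  intro acc seq _
  simp only [List.foldl_flatMap, List.foldl_map]


-- the port's sort, re-expressed with the LinearOrder instances the PySem order lemmas use
theorem sorted_inst (xs : List (List String)) :
    PySem.List.sorted xs (fun x => x) false
      = @PySem.List.sorted (List String) (List String) List.instLinearOrder.toLT LinearOrder.toDecidableLT xs (fun x => x) false := by
  congr 1

theorem pvRunLen_eq_takeWhile (x : List String) : ∀ ys : List (List String),
    pvRunLen x ys = (ys.takeWhile (fun y => y == x)).length := by
  intro ys; induction ys with
  | nil => rfl
  | cons y ys ih =>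
    by_cases h : (y == x) = true
    · simp [pvRunLen, h, ih, Nat.add_comm]
    · simp [pvRunLen, h]

theorem drop_pvRunLen (x : List String) : ∀ ys : List (List String),
    ys.drop (pvRunLen x ys) = ys.dropWhile (fun y => y == x) := by
  intro ys; induction ys with
  | nil => rfl
  | cons y ys ih =>
    by_cases h : (y == x) = true
    · have h1 : pvRunLen x (y :: ys) = pvRunLen x ys + 1 := by simp [pvRunLen, h, Nat.add_comm]
      rw [h1, List.drop_succ_cons, ih, List.dropWhile_cons, if_pos h]
    · have h1 : pvRunLen x (y :: ys) = 0 := by simp [pvRunLen, h]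
      rw [h1, List.drop_zero, List.dropWhile_cons, if_neg h]

theorem dropWhile_head_false {α : Type} (p : α → Bool) :
    ∀ (l : List α) (y : α) (rest : List α), l.dropWhile p = y :: rest → p y = false := by
  intro l
  induction l with
  | nil => intro y rest h; simp at h
  | cons a l ih =>
    intro y rest h
    by_cases hp : p a = true
    · rw [List.dropWhile_cons, if_pos hp] at h
      exact ih y rest h
    · rw [List.dropWhile_cons, if_neg hp] at h
      cases h
      simp only [Bool.not_eq_true] at hp
      exact hp

-- run-length counting of a sorted list records each element's exact multiplicity
theorem pvRleGo_get? : ∀ (l : List (List String)) (d : PySem.Dict (List String) Int),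
    l.Pairwise (fun a b => a ≤ b) → ∀ z : List String,
    (pvRleGo l d).get? z = if z ∈ l then some ((l.count z : Int)) else d.get? z := by
  intro l d
  induction l, d using pvRleGo.induct with
  | case1 counts => intro _ z; simp [pvRleGo]
  | case2 counts x xs hrun ih =>
    intro hp z
    have hxs : xs.Pairwise (fun a b => a ≤ b) := (List.pairwise_cons.1 hp).2
    have hxle : ∀ y ∈ xs, x ≤ y := (List.pairwise_cons.1 hp).1
    have hsplit : xs.takeWhile (fun y => y == x) ++ xs.dropWhile (fun y => y == x) = xs :=
      List.takeWhile_append_dropWhile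
    have htw : ∀ y ∈ xs.takeWhile (fun y => y == x), y = x := by
      intro y hy
      have := List.mem_takeWhile_imp hy
      exact eq_of_beq this
    have hdrop : (x :: xs).drop hrun = xs.dropWhile (fun y => y == x) := by
      show (x :: xs).drop (1 + pvRunLen x xs) = _
      rw [Nat.add_comm, List.drop_succ_cons, drop_pvRunLen]
    have hdrP : (xs.dropWhile (fun y => y == x)).Pairwise (fun a b => a ≤ b) :=
      List.Pairwise.sublist (List.dropWhile_sublist _) hxs
    have hxdr : x ∉ xs.dropWhile (fun y => y == x) := by
      cases hd : xs.dropWhile (fun y => y == x) with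
      | nil => simp
      | cons y rest =>
        have hyx : y ≠ x := by
          have := dropWhile_head_false (fun y : List String => y == x) xs y rest hd
          simpa using this
        have hymem : y ∈ xs := by
          have hy' : y ∈ xs.dropWhile (fun y => y == x) := by rw [hd]; exact List.mem_cons_self
          exact (List.dropWhile_sublist _).mem hy'
        have hxy : x < y := lt_of_le_of_ne (hxle y hymem) (Ne.symm hyx)
        intro hmem
        rcases List.mem_cons.1 hmem with h | h
        · exact hyx h.symm
        · have hpc := List.pairwise_cons.1 (hd ▸ hdrP)
          have : y ≤ x := hpc.1 x h
          exact absurd (lt_of_lt_of_le hxy this) (lt_irrefl x)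
    have hcount_t : (xs.takeWhile (fun y => y == x)).count x = (xs.takeWhile (fun y => y == x)).length := by
      rw [List.count_eq_length]
      intro b hb; exact (htw b hb).symm
    rw [hdrop] at ih
    rw [pvRleGo]
    show (pvRleGo ((x :: xs).drop hrun) (counts.insert x ((hrun : Nat) : Int))).get? z = _
    rw [hdrop]
    rw [ih hdrP]
    by_cases hz : z = x
    · rw [hz]
      rw [if_neg hxdr, if_pos (List.mem_cons_self), PySem.Dict.get?_insert_self]
      have hcx : (x :: xs).count x = hrun := by
        show _ = 1 + pvRunLen x xs
        rw [List.count_cons_self, pvRunLen_eq_takeWhile]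
        have : xs.count x = (xs.takeWhile (fun y => y == x)).count x + (xs.dropWhile (fun y => y == x)).count x := by
          conv_lhs => rw [← hsplit]
          rw [List.count_append]
        rw [this, hcount_t, List.count_eq_zero.2 hxdr]
        omega
      rw [hcx]
    · have hzt : z ∉ xs.takeWhile (fun y => y == x) := fun h => hz (htw z h)
      have hcz : z ∉ xs.dropWhile (fun y => y == x) → z ∉ (x :: xs) := by
        intro hzd hmem
        rcases List.mem_cons.1 hmem with h | h
        · exact hz h
        · rw [← hsplit] at h
          rcases List.mem_append.1 h with h | h
          · exact hzt h
          · exact hzd h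
      by_cases hzd : z ∈ xs.dropWhile (fun y => y == x)
      · rw [if_pos hzd]
        have hzl : z ∈ (x :: xs) := by
          refine List.mem_cons.2 (Or.inr ?_)
          rw [← hsplit]; exact List.mem_append.2 (Or.inr hzd)
        rw [if_pos hzl]
        have : (x :: xs).count z = (xs.dropWhile (fun y => y == x)).count z := by
          rw [List.count_cons_of_ne (Ne.symm hz)]
          conv_lhs => rw [← hsplit]
          rw [List.count_append, List.count_eq_zero.2 hzt]
          omega
        rw [this]
      · rw [if_neg hzd, if_neg (hcz hzd), PySem.Dict.get?_insert_of_ne _ _ hz]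

-- folding 'insert if frequent' over fresh, distinct keys appends exactly the kept pairs
theorem items_foldl_insertIf (c : List String → Int) (f : Int) :
    ∀ (l : List (List String)) (d : PySem.Dict (List String) Int), l.Nodup →
    (∀ k ∈ l, d.contains k = false) →
    (l.foldl (fun fp p => if f ≤ c p then fp.insert p (c p) else fp) d).items
      = d.items ++ l.filterMap (fun p => if f ≤ c p then some (p, c p) else none) := by
  intro l
  induction l with
  | nil => intro d _ _; simp
  | cons x xs ih =>
    intro d hnd hf
    have hx : d.contains x = false := hf x List.mem_cons_self
    have hxxs : x ∉ xs := (List.nodup_cons.1 hnd).1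
    simp only [List.foldl_cons, List.filterMap_cons]
    by_cases hc : f ≤ c x
    · rw [if_pos hc, if_pos hc]
      rw [ih (d.insert x (c x)) (List.nodup_cons.1 hnd).2 ?_]
      · rw [PySem.Dict.items_insert_of_not_contains _ _ hx, List.append_assoc]
        rfl
      · intro k hk
        rw [PySem.Dict.contains_insert]
        have hkx : (k == x) = false := by
          simp only [beq_eq_false_iff_ne]; exact fun h => hxxs (h ▸ hk)
        rw [hkx, hf k (List.mem_cons_of_mem _ hk)]
        rfl
    · rw [if_neg hc, if_neg hc]
      exact ih d (List.nodup_cons.1 hnd).2 (fun k hk => hf k (List.mem_cons_of_mem _ hk))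

-- the distinct elements of ws not yet in s, in first-seen order
def pvNewDistinct (s : PySem.Set (List String)) : List (List String) → List (List String)
  | [] => []
  | w :: ws => if PySem.Set.contains s w then pvNewDistinct s ws
               else w :: pvNewDistinct (PySem.Set.add s w) ws

theorem emit_items (f : Int) (counts : PySem.Dict (List String) Int) :
    ∀ (ws : List (List String)) (s : PySem.Set (List String)) (d : PySem.Dict (List String) Int),
    (∀ k, d.contains k = true → PySem.Set.contains s k = true) →
    ((ws.foldl (fun (st : PySem.Set (List String) × PySem.Dict (List String) Int) w =>
      if PySem.Set.contains st.1 w then st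
      else
        if f ≤ (counts.get? w).getD 0 then (PySem.Set.add st.1 w, st.2.insert w ((counts.get? w).getD 0))
        else (PySem.Set.add st.1 w, st.2)) (s, d)).2).items
      = d.items ++ (pvNewDistinct s ws).filterMap
          (fun w => if f ≤ (counts.get? w).getD 0 then some (w, (counts.get? w).getD 0) else none) := by
  intro ws
  induction ws with
  | nil => intro s d _; simp [pvNewDistinct]
  | cons w ws ih =>
    intro s d hd
    simp only [List.foldl_cons]
    by_cases hsw : PySem.Set.contains s w = true
    · rw [if_pos hsw]
      simp only [pvNewDistinct, if_pos hsw]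
      exact ih s d hd
    · have hdw : d.contains w = false := by
        cases h : d.contains w
        · rfl
        · exact absurd (hd w h) hsw
      rw [if_neg hsw]
      simp only [pvNewDistinct, if_neg hsw, List.filterMap_cons]
      by_cases hc : f ≤ (counts.get? w).getD 0
      · rw [if_pos hc, if_pos hc]
        rw [ih (PySem.Set.add s w) (d.insert w ((counts.get? w).getD 0)) ?_]
        · rw [PySem.Dict.items_insert_of_not_contains _ _ hdw, List.append_assoc]
          rfl
        · intro k hk
          rw [PySem.Dict.contains_insert] at hk
          rcases Bool.or_eq_true_iff.1 hk with h | h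
          · have : k = w := eq_of_beq h
            subst this
            exact (PySem.Set.contains_iff _ _).2 ((PySem.Set.mem_add _ _ _).2 (Or.inr rfl))
          · exact (PySem.Set.contains_iff _ _).2
              ((PySem.Set.mem_add _ _ _).2 (Or.inl ((PySem.Set.contains_iff _ _).1 (hd k h))))
      · rw [if_neg hc, if_neg hc]
        exact ih (PySem.Set.add s w) d (fun k hk =>
          (PySem.Set.contains_iff _ _).2 ((PySem.Set.mem_add _ _ _).2 (Or.inl ((PySem.Set.contains_iff _ _).1 (hd k hk)))))

theorem pvNewDistinct_update : ∀ (ws : List (List String)) (s : PySem.Set (List String)), s.Nodup →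
    s ++ pvNewDistinct s ws = PySem.Set.update s ws := by
  intro ws
  induction ws with
  | nil => intro s _; simp [pvNewDistinct, PySem.Set.update]
  | cons w ws ih =>
    intro s hs
    rw [PySem.Set.update_cons]
    by_cases hsw : PySem.Set.contains s w = true
    · have hmem : w ∈ s := (PySem.Set.contains_iff _ _).1 hsw
      simp only [pvNewDistinct, if_pos hsw]
      rw [PySem.Set.add_of_mem hmem]
      exact ih s hs
    · have hmem : w ∉ s := fun h => hsw ((PySem.Set.contains_iff _ _).2 h)
      simp only [pvNewDistinct, if_neg hsw]
      rw [← ih (PySem.Set.add s w) (PySem.Set.nodup_add _ _ hs)]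
      rw [PySem.Set.add_of_not_mem hmem, List.append_assoc]
      rfl

theorem pvNewDistinct_empty (ws : List (List String)) :
    pvNewDistinct PySem.Set.empty ws = PySem.List.dedup ws := by
  have h := pvNewDistinct_update ws PySem.Set.empty List.nodup_nil
  simpa [PySem.Set.update_nil_left, PySem.List.dedup_eq_ofList] using h

-- the run-length dict looked up at any actual window yields the window's count
theorem counts_get (windows : List (List String)) (w : List String) (hw : w ∈ windows) :
    ((pvRleGo (PySem.List.sorted windows (fun x => x) false) PySem.Dict.empty).get? w).getD 0
      = (windows.count w : Int) := by
  rw [sorted_inst]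
  have hpw : (@PySem.List.sorted (List String) (List String) List.instLinearOrder.toLT
      LinearOrder.toDecidableLT windows (fun x => x) false).Pairwise (fun a b => a ≤ b) := by
    have := PySem.List.sorted_pairwise (κ := List String) windows (fun x => x)
    simpa using this
  have hmem : w ∈ @PySem.List.sorted (List String) (List String) List.instLinearOrder.toLT
      LinearOrder.toDecidableLT windows (fun x => x) false :=
    (@PySem.List.mem_sorted _ _ List.instLinearOrder.toLT LinearOrder.toDecidableLT windows (fun x => x) false w).2 hw
  rw [pvRleGo_get? _ _ hpw, if_pos hmem]
  have hperm := @PySem.List.sorted_perm _ _ List.instLinearOrder.toLT LinearOrder.toDecidableLT windows (fun x => x) false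
  rw [hperm.count_eq]
  rfl

theorem main_eq (sequences : List (List String)) (min_length max_length min_frequency : Int) :
    find_sequential_patterns_py sequences min_length max_length min_frequency
      = find_sequential_patterns_py_alt sequences min_length max_length min_frequency := by
  simp only [find_sequential_patterns_py, find_sequential_patterns_py_alt]
  rw [counts_eq, PySem.Dict.items_counter, List.foldl_map]
  rw [items_foldl_insertIf _ _ _ _ (PySem.Set.nodup_ofList _) (fun k _ => PySem.Dict.contains_empty _)]
  rw [emit_items _ _ _ _ _ (fun k h => absurd h (by simp [PySem.Dict.contains_empty]))]
  rw [pvNewDistinct_empty]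
  simp only [PySem.List.dedup_eq_ofList]
  apply List.filterMap_congr
  intro w hw
  rw [counts_get _ w ((PySem.Set.mem_ofList _ _).1 hw)]

-- ===== VERDICT (by name: the statement is the Claim_ definition above) =====
theorem find_sequential_patterns_py_spec : Claim_equal_find_sequential_patterns_py := by
  intro sequences min_length max_length min_frequency _
  exact main_eq sequences min_length max_length min_frequency
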